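-- pv_equiv track=rewrite | github.com/jonggyup/e2e-agentic-workflow-profiler | src/agent_profiler/collector/openclaw_converter.py | _map_iterations_to_attempts
-- ===== SOURCE A (Python) =====
-- def _map_iterations_to_attempts(
--     n_iterations: int,
--     boundaries: list[int],
-- ) -> list[int]:
--     """Return a list of 1-based attempt numbers, one per iteration index."""
--     attempt_map: list[int] = []
--     for idx in range(n_iterations):
--         attempt_num = 1
--         for k, boundary in enumerate(boundaries):
--             if idx >= boundary:
--                 attempt_num = k + 1
--         attempt_map.append(attempt_num)
--     return attempt_map
-- ===== SOURCE B (Python) =====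
-- def _map_iterations_to_attempts(
--     n_iterations: int,
--     boundaries: list[int],
-- ) -> list[int]:
--     """Return a list of 1-based attempt numbers, one per iteration index."""
--     attempt_map = [1] * n_iterations
--     for k, boundary in enumerate(boundaries):
--         start = max(boundary, 0)
--         attempt_map[start:] = [k + 1] * (len(attempt_map) - start)
--     return attempt_map
-- ===== Notes on version B (the rewrite author's own statement) =====
-- stated objective: alternative
-- what changed: Inverts the loop nesting: instead of scanning all boundaries for each iteration index, B starts from [1]*n and, per boundary k, overwrites the tail slice from max(boundary,0) with k+1, so later boundaries' writes win exactly like A's last-matching-k scan.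
import Mathlib
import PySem

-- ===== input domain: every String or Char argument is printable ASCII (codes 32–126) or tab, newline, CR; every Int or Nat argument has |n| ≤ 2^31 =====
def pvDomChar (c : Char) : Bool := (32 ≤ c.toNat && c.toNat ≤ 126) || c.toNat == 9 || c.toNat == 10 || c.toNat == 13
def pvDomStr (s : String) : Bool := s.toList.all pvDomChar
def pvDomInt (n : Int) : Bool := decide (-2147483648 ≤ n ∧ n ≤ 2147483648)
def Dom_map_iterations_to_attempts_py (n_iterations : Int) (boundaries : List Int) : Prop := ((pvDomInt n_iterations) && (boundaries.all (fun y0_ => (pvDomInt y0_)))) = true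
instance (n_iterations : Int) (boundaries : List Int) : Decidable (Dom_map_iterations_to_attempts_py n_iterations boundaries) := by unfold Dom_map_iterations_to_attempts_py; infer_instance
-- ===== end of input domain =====

-- B inverts A's loop nesting: one tail-slice fill per boundary (last write wins) instead of a
-- per-index scan of all boundaries; an alternative decomposition of the same computation.

-- ===== PORT A =====
-- for idx in range(n): attempt=1; for k,b in enumerate(boundaries): if idx>=b: attempt=k+1; append
def map_iterations_to_attempts_py (n_iterations : Int) (boundaries : List Int) : List Int :=
  (PySem.List.pyRange 0 n_iterations 1).map (fun idx =>
    (PySem.List.enumerate boundaries).foldl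
      (fun attempt_num kb => if idx ≥ kb.2 then kb.1 + 1 else attempt_num) 1)

-- ===== PORT B =====
-- attempt_map = [1]*n; for k,b in enumerate(boundaries): start=max(b,0); attempt_map[start:] = [k+1]*(len-start)
def map_iterations_to_attempts_py_alt (n_iterations : Int) (boundaries : List Int) : List Int :=
  (PySem.List.enumerate boundaries).foldl
    (fun attempt_map kb =>
      attempt_map.take (max kb.2 0).toNat ++
        List.replicate (attempt_map.length - (max kb.2 0).toNat) (kb.1 + 1))
    (List.replicate n_iterations.toNat 1)

-- ===== PRECONDITION & SPEC =====
def Spec_map_iterations_to_attempts_py (n_iterations : Int) (boundaries : List Int) (out : List Int) : Prop := out = map_iterations_to_attempts_py_alt n_iterations boundaries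
instance (n_iterations : Int) (boundaries : List Int) (out : List Int) : Decidable (Spec_map_iterations_to_attempts_py n_iterations boundaries out) := by unfold Spec_map_iterations_to_attempts_py; infer_instance

-- ===== CLAIM (what is proved, stated in full; the proofs are below) =====
def Claim_equal_map_iterations_to_attempts_py : Prop := ∀ (n_iterations : Int) (boundaries : List Int), Dom_map_iterations_to_attempts_py n_iterations boundaries → Spec_map_iterations_to_attempts_py n_iterations boundaries (map_iterations_to_attempts_py n_iterations boundaries)

-- ===== LEMMAS AND PROOFS =====

-- length is preserved by B's fold
theorem pv_alt_fold_length (ps : List (Int × Int)) (l : List Int) :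
    (ps.foldl (fun attempt_map kb =>
      attempt_map.take (max kb.2 0).toNat ++
        List.replicate (attempt_map.length - (max kb.2 0).toNat) (kb.1 + 1)) l).length
      = l.length := by
  induction ps generalizing l with
  | nil => rfl
  | cons p ps ih =>
      simp only [List.foldl_cons, ih, List.length_append, List.length_take,
        List.length_replicate]
      omega

-- one fill step, viewed at a fixed index i
theorem pv_step_getD (l : List Int) (v : Int) (s i : Nat) (hi : i < l.length) :
    (l.take s ++ List.replicate (l.length - s) v).getD i 0
      = if s ≤ i then v else l.getD i 0 := by
  by_cases h : s ≤ i
  · rw [if_pos h, List.getD_eq_getElem?_getD,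
      List.getElem?_append_right (by simp [List.length_take]; omega),
      List.getElem?_replicate, if_pos (by simp [List.length_take]; omega)]
    rfl
  · rw [if_neg h, List.getD_eq_getElem?_getD,
      List.getElem?_append_left (by simp [List.length_take]; omega),
      List.getElem?_take_of_lt (by omega), ← List.getD_eq_getElem?_getD]

-- B's fill fold, viewed at a fixed index i, is A's inner scan fold
theorem pv_alt_fold_getD (ps : List (Int × Int)) (l : List Int) (i : Nat) (hi : i < l.length) :
    (ps.foldl (fun attempt_map kb =>
      attempt_map.take (max kb.2 0).toNat ++
        List.replicate (attempt_map.length - (max kb.2 0).toNat) (kb.1 + 1)) l).getD i 0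
      = ps.foldl (fun a kb => if (i : Int) ≥ kb.2 then kb.1 + 1 else a) (l.getD i 0) := by
  induction ps generalizing l with
  | nil => rfl
  | cons p ps ih =>
      simp only [List.foldl_cons]
      rw [ih _ (by simp [List.length_take, List.length_replicate]; omega),
        pv_step_getD l (p.1 + 1) (max p.2 0).toNat i hi]
      have hiff : (max p.2 0).toNat ≤ i ↔ (i : Int) ≥ p.2 := by
        rw [Int.toNat_le]
        omega
      by_cases h : (i : Int) ≥ p.2
      · rw [if_pos (hiff.mpr h), if_pos h]
      · rw [if_neg (fun hc => h (hiff.mp hc)), if_neg h]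

-- ===== VERDICT (by name: the statement is the Claim_ definition above) =====
theorem map_iterations_to_attempts_py_spec : Claim_equal_map_iterations_to_attempts_py := by
  intro n bs _
  unfold Spec_map_iterations_to_attempts_py map_iterations_to_attempts_py
    map_iterations_to_attempts_py_alt
  have hlen : (List.replicate n.toNat (1 : Int)).length = n.toNat := List.length_replicate
  apply List.ext_getElem
  · rw [List.length_map, PySem.List.length_pyRange_one, pv_alt_fold_length, hlen]
    simp
  · intro i h1 h2
    have hi : i < n.toNat := by
      rwa [List.length_map, PySem.List.length_pyRange_one, Int.sub_zero] at h1
    rw [List.getElem_map, PySem.List.getElem_pyRange_one, Int.zero_add,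
      ← List.getD_eq_getElem _ 0, pv_alt_fold_getD _ _ i (by rw [hlen]; exact hi),
      List.getD_eq_getElem _ 0 (by rw [hlen]; exact hi), List.getElem_replicate]
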